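-- pv_equiv track=rewrite | github.com/stacy-sg/algorithm | 2026-03/P389481_봉인된주문.py | solution
-- ===== SOURCE A (Python) =====
-- def word_to_int(word):
--     """문자열을 26진법 숫자로 변환하는 함수"""
--     val = 0
--     for char in word:
--         # 'a'는 1, 'b'는 2, ..., 'z'는 26
--         val = val * 26 + (ord(char) - ord('a') + 1)
--     return val
--
-- def int_to_word(val):
--     """숫자를 다시 알파벳 문자열로 역변환하는 함수"""
--     res = []
--     while val > 0:
--         val -= 1  # 1-based 인덱스이므로 1을 빼고 계산해야 'a'부터 딱 맞아떨어짐
--         res.append(chr((val % 26) + ord('a')))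
--         val //= 26
--
--     # 일의 자리부터 구했으므로 리스트를 뒤집어서 문자열로 합침
--     return "".join(res[::-1])
--
-- def solution(n, bans):
--     # 1. bans 리스트의 모든 단어를 숫자로 변환
--     banned_nums = [word_to_int(word) for word in bans]
--
--     # 2. 삭제된 번호들을 오름차순으로 정렬
--     banned_nums.sort()
--
--     # 3. 목표 숫자 추적 시작
--     target = n
--
--     # 4. 삭제된 숫자를 보며 target 인덱스 밀어내기
--     for b in banned_nums:
--         if b <= target:
--             target += 1
--         else:
--             break
--
--     # 5. 최종 결정된 숫자를 문자열로 변환하여 반환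
--     return int_to_word(target)
-- ===== SOURCE B (Python) =====
-- def word_to_int(word):
--     val = 0
--     for char in word:
--         val = val * 26 + (ord(char) - ord('a') + 1)
--     return val
--
-- def int_to_word(val):
--     res = []
--     while val > 0:
--         val -= 1
--         res.append(chr((val % 26) + ord('a')))
--         val //= 26
--     return "".join(res[::-1])
--
-- def solution(n, bans):
--     banned = sorted(word_to_int(w) for w in bans)
--     # m[i] = max(banned[j] - j for j <= i): a nondecreasing sequence;
--     # the answer is n + k where k is the first index with banned[k] > n + k,
--     # i.e. the first index with m[i] > n -- found by binary search.
--     m = []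
--     best = None
--     for i, b in enumerate(banned):
--         d = b - i
--         if best is None or d > best:
--             best = d
--         m.append(best)
--     lo, hi = 0, len(m)
--     while lo < hi:
--         mid = (lo + hi) // 2
--         if m[mid] > n:
--             hi = mid
--         else:
--             lo = mid + 1
--     return int_to_word(n + lo)
-- ===== Notes on version B (the rewrite author's own statement) =====
-- stated objective: alternative
-- what changed: A locates the answer by linearly pushing the target through the sorted banned values one element at a time; B instead builds the (nondecreasing) prefix maxima of banned[i]-i in one pass and binary-searches them for the first index exceeding n, returning int_to_word(n+index).
import Mathlib
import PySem

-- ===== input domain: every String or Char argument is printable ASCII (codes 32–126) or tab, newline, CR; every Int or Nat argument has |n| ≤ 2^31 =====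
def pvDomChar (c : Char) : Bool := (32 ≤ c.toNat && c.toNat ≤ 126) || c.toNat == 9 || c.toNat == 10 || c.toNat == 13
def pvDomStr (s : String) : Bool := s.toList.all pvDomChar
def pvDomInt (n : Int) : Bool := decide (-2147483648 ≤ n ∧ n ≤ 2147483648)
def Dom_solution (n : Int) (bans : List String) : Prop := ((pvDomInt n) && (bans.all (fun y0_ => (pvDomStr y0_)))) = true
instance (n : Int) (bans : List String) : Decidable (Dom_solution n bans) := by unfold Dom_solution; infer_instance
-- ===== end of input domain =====

-- B replaces A's linear push of the target through the sorted banned values by a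
-- prefix-maxima pass plus a binary search (alternative decomposition, same cost class).

-- ===== PORT A =====
-- shared helper `word_to_int` (identical in A and B)
def wordToInt (word : String) : Int :=
  word.toList.foldl (fun val c => val * 26 + ((c.toNat : Int) - 97 + 1)) 0

-- shared helper `int_to_word` (identical in A and B); the while-loop, building `res`
def intToWordLoop (val : Int) (res : List Char) : List Char :=
  if _h : 0 < val then
    intToWordLoop (PySem.Int.floordiv (val - 1) 26)
      (res ++ [Char.ofNat ((PySem.Int.mod (val - 1) 26).toNat + 97)])
  else res
termination_by val.toNat
decreasing_by
  rw [PySem.Int.floordiv_eq_ediv_of_pos (by norm_num)]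
  omega

-- `"".join(res[::-1])`; `[::-1]` is List.reverse (PySem.List.slice?_none_none_neg_one)
def intToWord (val : Int) : String :=
  String.ofList (intToWordLoop val []).reverse

-- A's step-4 loop: push `target` past banned values, break at the first larger one
def pushLoop (target : Int) : List Int → Int
  | [] => target
  | b :: rest => if b ≤ target then pushLoop (target + 1) rest else target

def solution (n : Int) (bans : List String) : String :=
  intToWord (pushLoop n (PySem.List.sorted (bans.map wordToInt) (fun x => x)))

-- ===== PORT B =====
-- the `for i, b in enumerate(banned)` loop building the prefix maxima `m` of banned[i]-i
def buildM (banned : List Int) : List Int :=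
  ((PySem.List.enumerate banned).foldl
    (fun (st : Option Int × List Int) ib =>
      let d := ib.2 - ib.1
      let best : Int := match st.1 with
        | none => d
        | some b => if b < d then d else b
      (some best, st.2 ++ [best]))
    (none, [])).2

-- midpoint bounds, cited by bsLoop's decreasing_by
theorem bs_mid_bounds {lo hi : Int} (h : lo < hi) :
    lo ≤ PySem.Int.floordiv (lo + hi) 2 ∧ PySem.Int.floordiv (lo + hi) 2 < hi := by
  rw [PySem.Int.floordiv_eq_ediv_of_pos (by norm_num)]
  omega

-- B's `while lo < hi` binary search; `m[mid]` is in range on every call, so the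
-- `.getD 0` default is never used
def bsLoop (m : List Int) (n lo hi : Int) : Int :=
  if h : lo < hi then
    let mid := PySem.Int.floordiv (lo + hi) 2
    if n < (PySem.List.pyGet? m mid).getD 0 then bsLoop m n lo mid
    else bsLoop m n (mid + 1) hi
  else lo
termination_by (hi - lo).toNat
decreasing_by
  · have := bs_mid_bounds h; omega
  · have := bs_mid_bounds h; omega

def solution_alt (n : Int) (bans : List String) : String :=
  let banned := PySem.List.sorted (bans.map wordToInt) (fun x => x)
  let m := buildM banned
  intToWord (n + bsLoop m n 0 (m.length : Int))

-- ===== PRECONDITION & SPEC =====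
def Spec_solution (n : Int) (bans : List String) (out : String) : Prop := out = solution_alt n bans
instance (n : Int) (bans : List String) (out : String) : Decidable (Spec_solution n bans out) := by unfold Spec_solution; infer_instance

-- ===== CLAIM (what is proved, stated in full; the proofs are below) =====
def Claim_equal_solution : Prop := ∀ (n : Int) (bans : List String), Dom_solution n bans → Spec_solution n bans (solution n bans)

-- ===== LEMMAS AND PROOFS =====

-- the index at which A's push loop breaks (first i with s[i] > t + i)
def firstBreak : List Int → Int → Nat
  | [], _ => 0
  | b :: r, t => if b ≤ t then firstBreak r (t + 1) + 1 else 0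

theorem pushLoop_eq_firstBreak (s : List Int) : ∀ t : Int,
    pushLoop t s = t + (firstBreak s t : Int) := by
  induction s with
  | nil => intro t; simp [pushLoop, firstBreak]
  | cons b r ih =>
      intro t
      simp only [pushLoop, firstBreak]
      split
      · rw [ih (t + 1)]; push_cast; ring
      · simp

theorem firstBreak_le (s : List Int) : ∀ t : Int, firstBreak s t ≤ s.length := by
  induction s with
  | nil => intro t; simp [firstBreak]
  | cons b r ih =>
      intro t
      simp only [firstBreak, List.length_cons]
      split
      · exact Nat.succ_le_succ (ih (t + 1))
      · exact Nat.zero_le _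

-- the loop body's update of `best` (None start, then running maximum)
def maxO (best : Option Int) (d : Int) : Int :=
  match best with
  | none => d
  | some x => if x < d then d else x

theorem maxO_le {best : Option Int} {d n : Int}
    (hb : ∀ x, best = some x → x ≤ n) (hd : d ≤ n) : maxO best d ≤ n := by
  cases best with
  | none => simpa [maxO] using hd
  | some x =>
      have := hb x rfl
      by_cases h : x < d <;> simp [maxO, h] <;> omega

theorem lt_maxO_of_lt {best : Option Int} {d n : Int} (hd : n < d) : n < maxO best d := by
  cases best with
  | none => simpa [maxO] using hd
  | some x => by_cases h : x < d <;> simp [maxO, h] <;> omega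

theorem lt_maxO_of_some {x d n : Int} (hx : n < x) : n < maxO (some x) d := by
  by_cases h : x < d <;> simp [maxO, h] <;> omega

-- recursive specification of B's prefix-maxima list
def mSpec : List Int → Int → Option Int → List Int
  | [], _, _ => []
  | b :: r, i, best =>
      let best' := maxO best (b - i)
      best' :: mSpec r (i + 1) (some best')

theorem buildM_snd (s : List Int) : ∀ (i : Int) (best : Option Int) (acc : List Int),
    ((PySem.List.enumerate s i).foldl
      (fun (st : Option Int × List Int) ib =>
        let d := ib.2 - ib.1
        let best : Int := match st.1 with
          | none => d
          | some b => if b < d then d else b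
        (some best, st.2 ++ [best]))
      (best, acc)).2 = acc ++ mSpec s i best := by
  induction s with
  | nil => intro i best acc; simp [PySem.List.enumerate_nil, mSpec]
  | cons b r ih =>
      intro i best acc
      rw [PySem.List.enumerate_cons]
      simp only [List.foldl_cons]
      rw [ih]
      simp [mSpec, maxO, List.append_assoc]

theorem buildM_eq_mSpec (s : List Int) : buildM s = mSpec s 0 none := by
  unfold buildM
  rw [buildM_snd]
  simp

theorem length_mSpec (s : List Int) : ∀ (i : Int) (best : Option Int),
    (mSpec s i best).length = s.length := by
  induction s with
  | nil => intro i best; simp [mSpec]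
  | cons b r ih => intro i best; simp [mSpec, ih]

theorem mSpec_low (s : List Int) : ∀ (i0 : Int) (best : Option Int) (n : Int) (j : Nat),
    (∀ x, best = some x → x ≤ n) → j < firstBreak s (n + i0) →
    (mSpec s i0 best).getD j 0 ≤ n := by
  induction s with
  | nil => intro i0 best n j _ hj; simp [firstBreak] at hj
  | cons b r ih =>
      intro i0 best n j hbest hj
      by_cases hb : b ≤ n + i0
      · have hbest' : maxO best (b - i0) ≤ n := maxO_le hbest (by omega)
        cases j with
        | zero => simpa [mSpec] using hbest'
        | succ j' =>
            have hj' : j' < firstBreak r (n + (i0 + 1)) := by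
              have he : n + (i0 + 1) = n + i0 + 1 := by ring
              rw [he]
              simp only [firstBreak, if_pos hb] at hj
              omega
            have := ih (i0 + 1) (some (maxO best (b - i0))) n j'
              (by intro x hx; cases hx; exact hbest') hj'
            simpa [mSpec] using this
      · simp only [firstBreak, if_neg hb] at hj
        omega

theorem mSpec_allhigh (s : List Int) : ∀ (i0 b n : Int) (j : Nat),
    n < b → j < s.length → n < (mSpec s i0 (some b)).getD j 0 := by
  induction s with
  | nil => intro i0 b n j _ hj; simp at hj
  | cons a r ih =>
      intro i0 b n j hb hj
      have hbest' : n < maxO (some b) (a - i0) := lt_maxO_of_some hb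
      cases j with
      | zero => simpa [mSpec] using hbest'
      | succ j' =>
          have := ih (i0 + 1) _ n j' hbest' (by simpa using Nat.lt_of_succ_lt_succ hj)
          simpa [mSpec] using this

theorem mSpec_high (s : List Int) : ∀ (i0 : Int) (best : Option Int) (n : Int) (j : Nat),
    firstBreak s (n + i0) ≤ j → j < s.length →
    n < (mSpec s i0 best).getD j 0 := by
  induction s with
  | nil => intro i0 best n j _ hj; simp at hj
  | cons b r ih =>
      intro i0 best n j hk hj
      by_cases hb : b ≤ n + i0
      · simp only [firstBreak, if_pos hb] at hk
        cases j with
        | zero => omega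
        | succ j' =>
            have hj' : j' < r.length := by simpa using Nat.lt_of_succ_lt_succ hj
            have hk' : firstBreak r (n + (i0 + 1)) ≤ j' := by
              have he : n + (i0 + 1) = n + i0 + 1 := by ring
              rw [he]; omega
            have := ih (i0 + 1) (some (maxO best (b - i0))) n j' hk' hj'
            simpa [mSpec] using this
      · have hbest' : n < maxO best (b - i0) := lt_maxO_of_lt (by omega)
        cases j with
        | zero => simpa [mSpec] using hbest'
        | succ j' =>
            have := mSpec_allhigh r (i0 + 1) _ n j' hbest'
              (by simpa using Nat.lt_of_succ_lt_succ hj)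
            simpa [mSpec] using this

theorem bsLoop_finds (m : List Int) (n : Int) (k : Nat)
    (hlow : ∀ j : Nat, j < k → ¬ n < m.getD j 0)
    (hhigh : ∀ j : Nat, k ≤ j → j < m.length → n < m.getD j 0) :
    ∀ (lo hi : Int), 0 ≤ lo → lo ≤ (k : Int) → (k : Int) ≤ hi → hi ≤ (m.length : Int) →
    bsLoop m n lo hi = (k : Int) := by
  have main : ∀ (fuel : Nat) (lo hi : Int), (hi - lo).toNat ≤ fuel →
      0 ≤ lo → lo ≤ (k : Int) → (k : Int) ≤ hi → hi ≤ (m.length : Int) →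
      bsLoop m n lo hi = (k : Int) := by
    intro fuel
    induction fuel with
    | zero =>
        intro lo hi hfuel h0 hlk hkh hhl
        rw [bsLoop]
        rw [dif_neg (by omega)]
        omega
    | succ f ihf =>
        intro lo hi hfuel h0 hlk hkh hhl
        by_cases hlt : lo < hi
        · have hmid := bs_mid_bounds hlt
          set mid := PySem.Int.floordiv (lo + hi) 2 with hmiddef
          have hmid0 : 0 ≤ mid := by omega
          have hmidlen : mid.toNat < m.length := by omega
          have hget : (PySem.List.pyGet? m mid).getD 0 = m.getD mid.toNat 0 := by
            rw [PySem.List.pyGet?_of_nonneg _ hmid0, List.getD_eq_getElem?_getD]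
          rw [bsLoop, dif_pos hlt]
          simp only [← hmiddef, hget]
          by_cases hcmp : n < m.getD mid.toNat 0
          · rw [if_pos hcmp]
            have hkmid : k ≤ mid.toNat := by
              by_contra hcon
              exact hlow mid.toNat (by omega) hcmp
            exact ihf lo mid (by omega) h0 hlk (by omega) (by omega)
          · rw [if_neg hcmp]
            have hkmid : mid.toNat < k := by
              by_contra hcon
              exact hcmp (hhigh mid.toNat (by omega) hmidlen)
            exact ihf (mid + 1) hi (by omega) (by omega) (by omega) hkh hhl
        · rw [bsLoop, dif_neg hlt]
          omega
  intro lo hi h0 hlk hkh hhl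
  exact main (hi - lo).toNat lo hi le_rfl h0 hlk hkh hhl

theorem key (n : Int) (s : List Int) :
    n + bsLoop (mSpec s 0 none) n 0 ((mSpec s 0 none).length : Int) = pushLoop n s := by
  have hlen : (mSpec s 0 none).length = s.length := length_mSpec s 0 none
  have hkle : firstBreak s n ≤ (mSpec s 0 none).length := by
    rw [hlen]; exact firstBreak_le s n
  have hbs := bsLoop_finds (mSpec s 0 none) n (firstBreak s n)
    (by
      intro j hj hlt
      have hj' : j < firstBreak s (n + 0) := by simpa using hj
      have := mSpec_low s 0 none n j (by intro x hx; cases hx) hj'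
      omega)
    (by
      intro j hkj hjl
      exact mSpec_high s 0 none n j (by simpa using hkj) (by rwa [hlen] at hjl))
    0 ((mSpec s 0 none).length : Int) le_rfl (by exact_mod_cast Nat.zero_le _)
    (by exact_mod_cast hkle) le_rfl
  rw [hbs, pushLoop_eq_firstBreak]

-- ===== VERDICT (by name: the statement is the Claim_ definition above) =====
theorem solution_spec : Claim_equal_solution := by
  intro n bans _
  unfold Spec_solution
  simp only [solution, solution_alt, buildM_eq_mSpec]
  exact congrArg intToWord (key n _).symm
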